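-- pv_equiv track=rewrite | github.com/dvanderelst/DataHadley | Library/Process.py | find_threshold_crossings
-- ===== SOURCE A (Python) =====
-- def find_threshold_crossings(arr, threshold1, threshold2):
--     start_index = None
--     end_index = None
--     exceeding = False
--     for i in range(len(arr)):
--         if not exceeding and arr[i] > threshold1:
--             start_index = i
--             exceeding = True
--         elif exceeding and arr[i] < threshold2:
--             end_index = i
--             break
--     return start_index, end_index
-- ===== SOURCE B (Python) =====
-- def find_threshold_crossings(arr, threshold1, threshold2):
--     above = [i for i, v in enumerate(arr) if v > threshold1]
--     if not above:
--         return None, None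
--     start_index = above[0]
--     below = [j for j, v in enumerate(arr) if j > start_index and v < threshold2]
--     return start_index, below[0] if below else None
-- ===== Notes on version B (the rewrite author's own statement) =====
-- stated objective: alternative
-- what changed: Replaced the stateful break-on-first-hit scan by a filter-then-head formulation: materialise the full list of indices above threshold1 and, given its head s, the full list of indices after s below threshold2, taking each list's first element.
import Mathlib
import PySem

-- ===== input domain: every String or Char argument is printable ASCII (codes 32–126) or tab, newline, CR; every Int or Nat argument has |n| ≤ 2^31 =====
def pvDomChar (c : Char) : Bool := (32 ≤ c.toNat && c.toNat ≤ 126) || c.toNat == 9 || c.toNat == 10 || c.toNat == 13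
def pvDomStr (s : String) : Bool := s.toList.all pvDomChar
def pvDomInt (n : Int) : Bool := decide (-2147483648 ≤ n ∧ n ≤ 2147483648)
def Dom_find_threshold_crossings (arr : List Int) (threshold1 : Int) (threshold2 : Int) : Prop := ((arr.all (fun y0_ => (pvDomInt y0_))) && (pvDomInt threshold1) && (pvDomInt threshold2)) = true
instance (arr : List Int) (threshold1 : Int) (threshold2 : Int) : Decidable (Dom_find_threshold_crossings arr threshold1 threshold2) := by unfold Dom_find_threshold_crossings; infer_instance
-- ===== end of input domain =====

-- B replaces A's stateful break-on-first-hit scan by filter-then-head over the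
-- enumerated list (objective: alternative formulation, same O(n) cost).

-- ===== PORT A =====
-- Literal port of A: one loop over the list (index i carried explicitly) with
-- start_index / end_index / exceeding state; 'break' returns immediately.
def pvALoop (xs : List Int) (i : Int) (threshold1 threshold2 : Int)
    (s e : Option Int) (ex : Bool) : Option Int × Option Int :=
  match xs with
  | [] => (s, e)
  | x :: rest =>
    if !ex && x > threshold1 then
      pvALoop rest (i + 1) threshold1 threshold2 (some i) e true
    else if ex && x < threshold2 then
      (s, some i)
    else
      pvALoop rest (i + 1) threshold1 threshold2 s e ex

def find_threshold_crossings (arr : List Int) (threshold1 : Int) (threshold2 : Int) : Option Int × Option Int :=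
  pvALoop arr 0 threshold1 threshold2 none none false

-- ===== PORT B =====
-- Port of B: build the full list of indices above threshold1; if it is empty
-- return (None, None); else s is its head, and build the full list of indices
-- after s whose value is below threshold2, returning its head (None if empty).
def find_threshold_crossings_alt (arr : List Int) (threshold1 : Int) (threshold2 : Int) : Option Int × Option Int :=
  let above := ((PySem.List.enumerate arr).filter (fun p => decide (p.2 > threshold1))).map Prod.fst
  match above with
  | [] => (none, none)
  | s :: _ =>
    let below := ((PySem.List.enumerate arr).filter (fun p => decide (p.1 > s) && decide (p.2 < threshold2))).map Prod.fst
    (some s, below.head?)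

-- ===== PRECONDITION & SPEC =====
def Spec_find_threshold_crossings (arr : List Int) (threshold1 : Int) (threshold2 : Int) (out : Option Int × Option Int) : Prop := out = find_threshold_crossings_alt arr threshold1 threshold2
instance (arr : List Int) (threshold1 : Int) (threshold2 : Int) (out : Option Int × Option Int) : Decidable (Spec_find_threshold_crossings arr threshold1 threshold2 out) := by unfold Spec_find_threshold_crossings; infer_instance

-- ===== CLAIM =====
def Claim_equal_find_threshold_crossings : Prop := ∀ (arr : List Int) (threshold1 : Int) (threshold2 : Int), Dom_find_threshold_crossings arr threshold1 threshold2 → Spec_find_threshold_crossings arr threshold1 threshold2 (find_threshold_crossings arr threshold1 threshold2)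

-- ===== LEMMAS AND PROOFS =====

-- Once exceeding is true, A's loop returns s paired with the first index ≥ i
-- whose value is below t2.
def pvFirstBelow (xs : List Int) (j : Int) (threshold2 : Int) : Option Int :=
  match xs with
  | [] => none
  | x :: rest => if x < threshold2 then some j else pvFirstBelow rest (j + 1) threshold2

theorem pvALoop_true (xs : List Int) (i t1 t2 : Int) (s : Option Int) :
    pvALoop xs i t1 t2 s none true = (s, pvFirstBelow xs i t2) := by
  induction xs generalizing i with
  | nil => rfl
  | cons x rest ih =>
    simp only [pvALoop, pvFirstBelow]
    by_cases h : x < t2 <;> simp [h, ih]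

-- B's below-filter over an enumeration starting strictly after i is exactly
-- the first-below scan.
theorem below_filter (xs : List Int) (i j t2 : Int) (h : i < j) :
    (((PySem.List.enumerate xs j).filter
        (fun p => decide (i < p.1) && decide (p.2 < t2))).map Prod.fst).head?
      = pvFirstBelow xs j t2 := by
  induction xs generalizing j with
  | nil => rfl
  | cons x rest ih =>
    rw [PySem.List.enumerate_cons]
    simp only [List.filter_cons, pvFirstBelow]
    by_cases hx : x < t2
    · simp [hx, h]
    · simp [hx, ih (j + 1) (by omega)]

-- Every index produced by filtering an enumeration starting at j is ≥ j.
theorem fst_filter_ge (xs : List Int) (j : Int) (q : Int × Int → Bool) (s : Int)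
    (h : s ∈ ((PySem.List.enumerate xs j).filter q).map Prod.fst) : j ≤ s := by
  simp only [List.mem_map, List.mem_filter] at h
  obtain ⟨p, ⟨hp, _⟩, rfl⟩ := h
  rw [PySem.List.mem_enumerate_iff] at hp
  obtain ⟨k, hk, rfl⟩ := hp
  simp only []
  omega

-- Main invariant: A's loop from index i equals B's filter-then-head over the
-- enumeration starting at i.
theorem main_inv (xs : List Int) (i t1 t2 : Int) :
    pvALoop xs i t1 t2 none none false =
      (match ((PySem.List.enumerate xs i).filter (fun p => decide (t1 < p.2))).map Prod.fst with
        | [] => (none, none)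
        | s :: _ =>
          (some s, (((PySem.List.enumerate xs i).filter
              (fun p => decide (s < p.1) && decide (p.2 < t2))).map Prod.fst).head?)) := by
  induction xs generalizing i with
  | nil => rfl
  | cons x rest ih =>
    rw [PySem.List.enumerate_cons]
    simp only [pvALoop, List.filter_cons]
    by_cases hx : t1 < x
    · have hnot : ¬ (i < i) := by omega
      simp [hx, hnot, pvALoop_true, below_filter rest i (i + 1) t2 (by omega)]
    · simp only [gt_iff_lt, hx, decide_false, Bool.not_false, Bool.true_and, if_false,
        Bool.false_and, Bool.and_false]
      rw [ih (i + 1)]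
      cases hcase : ((PySem.List.enumerate rest (i + 1)).filter
          (fun p => decide (t1 < p.2))).map Prod.fst with
      | nil => simp [hcase]
      | cons s l =>
        have hs : i + 1 ≤ s := fst_filter_ge rest (i + 1) _ s
          (by rw [hcase]; exact List.mem_cons_self)
        have hsi : ¬ (s < i) := by omega
        simp [hcase, hsi]

-- ===== VERDICT =====
theorem find_threshold_crossings_spec : Claim_equal_find_threshold_crossings := by
  intro arr t1 t2 _
  show find_threshold_crossings arr t1 t2 = find_threshold_crossings_alt arr t1 t2
  simp only [find_threshold_crossings, find_threshold_crossings_alt, gt_iff_lt, main_inv]
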